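-- pv_equiv track=rewrite | github.com/joshuastiffler123/linux-forensics-toolkit | linux_journal_analyzer.py | _guess_priority
-- ===== SOURCE A (Python) =====
-- from typing import Dict, Iterator, List, Optional, Set, Tuple, Any
--
-- def _guess_priority(message: str, unit: str) -> Tuple[int, str]:
--     """Guess priority level from message content."""
--     message_lower = message.lower()
--
--     if any(w in message_lower for w in ['emerg', 'panic', 'fatal']):
--         return 0, "EMERG"
--     elif any(w in message_lower for w in ['alert']):
--         return 1, "ALERT"
--     elif any(w in message_lower for w in ['crit', 'critical']):
--         return 2, "CRIT"
--     elif any(w in message_lower for w in ['error', 'err:', 'failed', 'failure']):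
--         return 3, "ERR"
--     elif any(w in message_lower for w in ['warn', 'warning']):
--         return 4, "WARNING"
--     elif any(w in message_lower for w in ['notice']):
--         return 5, "NOTICE"
--     elif unit.lower() in ['kernel', 'audit']:
--         return 5, "NOTICE"
--     else:
--         return 6, "INFO"
-- ===== SOURCE B (Python) =====
-- # B: scan ALL keywords, collect codes of every match, return the MINIMUM code (most severe);
-- # correct because A's branch order is exactly ascending code order, so min(matched codes) = first matching branch.
-- from typing import Tuple
--
-- _KEYWORD_CODES = {
--     'emerg': 0, 'panic': 0, 'fatal': 0,
--     'alert': 1,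
--     'crit': 2, 'critical': 2,
--     'error': 3, 'err:': 3, 'failed': 3, 'failure': 3,
--     'warn': 4, 'warning': 4,
--     'notice': 5,
-- }
-- _LABELS = ['EMERG', 'ALERT', 'CRIT', 'ERR', 'WARNING', 'NOTICE', 'INFO']
--
-- def _guess_priority(message: str, unit: str) -> Tuple[int, str]:
--     ml = message.lower()
--     codes = [c for w, c in _KEYWORD_CODES.items() if w in ml]
--     if codes:
--         best = min(codes)
--         return best, _LABELS[best]
--     if unit.lower() in ('kernel', 'audit'):
--         return 5, 'NOTICE'
--     return 6, 'INFO'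
-- ===== Notes on version B (the rewrite author's own statement) =====
-- stated objective: alternative
-- what changed: Instead of an ordered first-match if/elif chain, B scans all keywords once, collects the severity codes of every keyword found, and returns the minimum code with its label from a code-indexed label table; the unit fallback only fires when no keyword matched.
import Mathlib
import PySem

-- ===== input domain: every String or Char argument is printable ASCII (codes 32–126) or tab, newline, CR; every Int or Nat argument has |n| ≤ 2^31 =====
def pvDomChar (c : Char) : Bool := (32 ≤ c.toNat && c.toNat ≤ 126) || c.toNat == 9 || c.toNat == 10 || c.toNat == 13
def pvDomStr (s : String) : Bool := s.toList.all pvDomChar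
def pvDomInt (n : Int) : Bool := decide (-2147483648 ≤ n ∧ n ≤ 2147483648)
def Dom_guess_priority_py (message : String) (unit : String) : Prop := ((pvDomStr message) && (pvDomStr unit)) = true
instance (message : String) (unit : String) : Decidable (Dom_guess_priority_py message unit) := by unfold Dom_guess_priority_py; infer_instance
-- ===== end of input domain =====

-- B scans all keywords, collects codes of every match and returns the minimum code with its label; alternative algorithm, same behaviour.


-- ===== PORT A =====
-- message_lower = message.lower() is inlined as PySem.Str.lower message at each use
def guess_priority_py (message : String) (unit : String) : Int × String :=
  if (["emerg", "panic", "fatal"].any (fun w => PySem.Str.isIn w (PySem.Str.lower message))) then (0, "EMERG")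
  else if (["alert"].any (fun w => PySem.Str.isIn w (PySem.Str.lower message))) then (1, "ALERT")
  else if (["crit", "critical"].any (fun w => PySem.Str.isIn w (PySem.Str.lower message))) then (2, "CRIT")
  else if (["error", "err:", "failed", "failure"].any (fun w => PySem.Str.isIn w (PySem.Str.lower message))) then (3, "ERR")
  else if (["warn", "warning"].any (fun w => PySem.Str.isIn w (PySem.Str.lower message))) then (4, "WARNING")
  else if (["notice"].any (fun w => PySem.Str.isIn w (PySem.Str.lower message))) then (5, "NOTICE")
  else if (PySem.Str.lower unit == "kernel" || PySem.Str.lower unit == "audit") then (5, "NOTICE")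
  else (6, "INFO")

-- ===== PORT B =====
-- keyword → severity code (the dict of Source B, as an association list in insertion order)
def pvKeywordCodes : List (String × Int) :=
  [("emerg", 0), ("panic", 0), ("fatal", 0),
   ("alert", 1),
   ("crit", 2), ("critical", 2),
   ("error", 3), ("err:", 3), ("failed", 3), ("failure", 3),
   ("warn", 4), ("warning", 4),
   ("notice", 5)]

-- code-indexed label table of Source B
def pvLabels : List String := ["EMERG", "ALERT", "CRIT", "ERR", "WARNING", "NOTICE", "INFO"]

-- ml = message.lower() is inlined; codes = [c for w,c in _KEYWORD_CODES.items() if w in ml];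
-- 'if codes: best = min(codes)' is the option match on min?; _LABELS[best] via pyGet? (index provably 0..5)
def guess_priority_py_alt (message : String) (unit : String) : Int × String :=
  match PySem.List.min? ((pvKeywordCodes.filter (fun wc => PySem.Str.isIn wc.1 (PySem.Str.lower message))).map (fun wc => wc.2)) (fun x => x) with
  | some best => (best, (PySem.List.pyGet? pvLabels best).getD "")
  | none =>
      if (PySem.Str.lower unit == "kernel" || PySem.Str.lower unit == "audit") then (5, "NOTICE")
      else (6, "INFO")

-- ===== PRECONDITION & SPEC =====
def Spec_guess_priority_py (message : String) (unit : String) (out : Int × String) : Prop := out = guess_priority_py_alt message unit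
instance (message : String) (unit : String) (out : Int × String) : Decidable (Spec_guess_priority_py message unit out) := by unfold Spec_guess_priority_py; infer_instance

-- ===== CLAIM (what is proved, stated in full; the proofs are below) =====
def Claim_equal_guess_priority_py : Prop := ∀ (message : String) (unit : String), Dom_guess_priority_py message unit → Spec_guess_priority_py message unit (guess_priority_py message unit)

-- ===== LEMMAS AND PROOFS =====

-- If every keyword with code < g misses and some keyword with code g hits, the minimum matched code is g.
theorem pv_min_filter_eq (l : List (String × Int)) (ml : String) (g : Int)
    (hlt : ∀ p ∈ l, p.2 < g → PySem.Str.isIn p.1 ml = false)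
    (hex : ∃ p, p ∈ l ∧ p.2 = g ∧ PySem.Str.isIn p.1 ml = true) :
    PySem.List.min? ((l.filter (fun wc => PySem.Str.isIn wc.1 ml)).map (fun wc => wc.2)) (fun x => x) = some g := by
  obtain ⟨p, hpl, hpg, hpin⟩ := hex
  have hmem : g ∈ (l.filter (fun wc => PySem.Str.isIn wc.1 ml)).map (fun wc => wc.2) :=
    List.mem_map.mpr ⟨p, List.mem_filter.mpr ⟨hpl, hpin⟩, hpg⟩
  cases hm : PySem.List.min? ((l.filter (fun wc => PySem.Str.isIn wc.1 ml)).map (fun wc => wc.2)) (fun x => x) with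
  | none =>
      rw [PySem.List.min?_eq_none_iff] at hm
      rw [hm] at hmem; simp at hmem
  | some m =>
      have h1 : m ≤ g := PySem.List.min?_isMin hm g hmem
      have h2 := PySem.List.min?_mem hm
      obtain ⟨q, hq, hqm⟩ := List.mem_map.mp h2
      have hq' := List.mem_filter.mp hq
      have h3 : ¬ q.2 < g := by
        intro hlt'
        have hfalse := hlt q hq'.1 hlt'
        have htrue := hq'.2
        rw [hfalse] at htrue
        exact absurd htrue (by simp)
      have : m = g := by omega
      rw [this]

-- ===== VERDICT (by name: the statement is the Claim_ definition above) =====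
theorem guess_priority_py_spec : Claim_equal_guess_priority_py := by
  intro message unit _
  unfold Spec_guess_priority_py guess_priority_py guess_priority_py_alt
  simp only [List.any_cons, List.any_nil, Bool.or_false, Bool.or_eq_true]
  by_cases hg1 : (PySem.Str.isIn "emerg" (PySem.Str.lower message) = true ∨ PySem.Str.isIn "panic" (PySem.Str.lower message) = true ∨ PySem.Str.isIn "fatal" (PySem.Str.lower message) = true)
  · rw [if_pos hg1]
    have hex : ∃ p, p ∈ pvKeywordCodes ∧ p.2 = (0:Int) ∧ PySem.Str.isIn p.1 (PySem.Str.lower message) = true := by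
      rcases hg1 with h | h | h
      · exact ⟨("emerg", 0), by decide, rfl, h⟩
      · exact ⟨("panic", 0), by decide, rfl, h⟩
      · exact ⟨("fatal", 0), by decide, rfl, h⟩
    rw [pv_min_filter_eq pvKeywordCodes (PySem.Str.lower message) 0
      (by intro p hp hplt; exfalso; fin_cases hp <;> simp_all) hex]
    rfl
  · rw [if_neg hg1]
    push Not at hg1
    obtain ⟨e1, e2, e3⟩ := hg1
    by_cases hg2 : PySem.Str.isIn "alert" (PySem.Str.lower message) = true
    · rw [if_pos hg2]
      rw [pv_min_filter_eq pvKeywordCodes (PySem.Str.lower message) 1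
        (by intro p hp hplt; fin_cases hp <;> simp_all)
        ⟨("alert", 1), by decide, rfl, hg2⟩]
      rfl
    · rw [if_neg hg2]
      by_cases hg3 : (PySem.Str.isIn "crit" (PySem.Str.lower message) = true ∨ PySem.Str.isIn "critical" (PySem.Str.lower message) = true)
      · rw [if_pos hg3]
        have hex : ∃ p, p ∈ pvKeywordCodes ∧ p.2 = (2:Int) ∧ PySem.Str.isIn p.1 (PySem.Str.lower message) = true := by
          rcases hg3 with h | h
          · exact ⟨("crit", 2), by decide, rfl, h⟩
          · exact ⟨("critical", 2), by decide, rfl, h⟩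
        rw [pv_min_filter_eq pvKeywordCodes (PySem.Str.lower message) 2
          (by intro p hp hplt; fin_cases hp <;> simp_all) hex]
        rfl
      · rw [if_neg hg3]
        push Not at hg3
        obtain ⟨e5, e6⟩ := hg3
        by_cases hg4 : (PySem.Str.isIn "error" (PySem.Str.lower message) = true ∨ PySem.Str.isIn "err:" (PySem.Str.lower message) = true ∨ PySem.Str.isIn "failed" (PySem.Str.lower message) = true ∨ PySem.Str.isIn "failure" (PySem.Str.lower message) = true)
        · rw [if_pos hg4]
          have hex : ∃ p, p ∈ pvKeywordCodes ∧ p.2 = (3:Int) ∧ PySem.Str.isIn p.1 (PySem.Str.lower message) = true := by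
            rcases hg4 with h | h | h | h
            · exact ⟨("error", 3), by decide, rfl, h⟩
            · exact ⟨("err:", 3), by decide, rfl, h⟩
            · exact ⟨("failed", 3), by decide, rfl, h⟩
            · exact ⟨("failure", 3), by decide, rfl, h⟩
          rw [pv_min_filter_eq pvKeywordCodes (PySem.Str.lower message) 3
            (by intro p hp hplt; fin_cases hp <;> simp_all) hex]
          rfl
        · rw [if_neg hg4]
          push Not at hg4
          obtain ⟨e7, e8, e9, e10⟩ := hg4
          by_cases hg5 : (PySem.Str.isIn "warn" (PySem.Str.lower message) = true ∨ PySem.Str.isIn "warning" (PySem.Str.lower message) = true)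
          · rw [if_pos hg5]
            have hex : ∃ p, p ∈ pvKeywordCodes ∧ p.2 = (4:Int) ∧ PySem.Str.isIn p.1 (PySem.Str.lower message) = true := by
              rcases hg5 with h | h
              · exact ⟨("warn", 4), by decide, rfl, h⟩
              · exact ⟨("warning", 4), by decide, rfl, h⟩
            rw [pv_min_filter_eq pvKeywordCodes (PySem.Str.lower message) 4
              (by intro p hp hplt; fin_cases hp <;> simp_all) hex]
            rfl
          · rw [if_neg hg5]
            push Not at hg5
            obtain ⟨e11, e12⟩ := hg5
            by_cases hg6 : PySem.Str.isIn "notice" (PySem.Str.lower message) = true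
            · rw [if_pos hg6]
              rw [pv_min_filter_eq pvKeywordCodes (PySem.Str.lower message) 5
                (by intro p hp hplt; fin_cases hp <;> simp_all)
                ⟨("notice", 5), by decide, rfl, hg6⟩]
              rfl
            · rw [if_neg hg6]
              have hempty : (pvKeywordCodes.filter (fun wc => PySem.Str.isIn wc.1 (PySem.Str.lower message))).map (fun wc => wc.2) = ([] : List Int) := by
                have f1 := Bool.not_eq_true _ |>.mp e1
                have f2 := Bool.not_eq_true _ |>.mp e2
                have f3 := Bool.not_eq_true _ |>.mp e3
                have f4 := Bool.not_eq_true _ |>.mp hg2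
                have f5 := Bool.not_eq_true _ |>.mp e5
                have f6 := Bool.not_eq_true _ |>.mp e6
                have f7 := Bool.not_eq_true _ |>.mp e7
                have f8 := Bool.not_eq_true _ |>.mp e8
                have f9 := Bool.not_eq_true _ |>.mp e9
                have f10 := Bool.not_eq_true _ |>.mp e10
                have f11 := Bool.not_eq_true _ |>.mp e11
                have f12 := Bool.not_eq_true _ |>.mp e12
                have f13 := Bool.not_eq_true _ |>.mp hg6
                simp only [pvKeywordCodes, List.filter_cons, List.filter_nil,
                  f1, f2, f3, f4, f5, f6, f7, f8, f9, f10, f11, f12, f13]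
                simp
              rw [hempty]
              rfl
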